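-- pv_equiv track=rewrite | github.com/percyli4718/openclaw | baoke_tong/skills/customer.py | _segment_by_id
-- ===== SOURCE A (Python) =====
-- from typing import List, Dict, Any, Optional
--
-- def _segment_by_id(customer_ids: List[str]) -> Dict[str, List[str]]:
--     """基于 ID 的模拟分层（占位符实现）"""
--     segments = {
--         "高价值": [],
--         "潜力": [],
--         "一般": [],
--         "低价值": []
--     }
--
--     # 使用 ID 哈希进行简单分层
--     for i, cust_id in enumerate(customer_ids):
--         if i % 4 == 0:
--             segments["高价值"].append(cust_id)
--         elif i % 4 == 1:
--             segments["潜力"].append(cust_id)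
--         elif i % 4 == 2:
--             segments["一般"].append(cust_id)
--         else:
--             segments["低价值"].append(cust_id)
--
--     return segments
-- ===== SOURCE B (Python) =====
-- def _segment_by_id(customer_ids):
--     """基于 ID 的模拟分层（占位符实现）"""
--     return {
--         "高价值": customer_ids[0::4],
--         "潜力": customer_ids[1::4],
--         "一般": customer_ids[2::4],
--         "低价值": customer_ids[3::4],
--     }
-- ===== Notes on version B (the rewrite author's own statement) =====
-- stated objective: idiomatic
-- what changed: Replaces the single enumerate loop with mod-4 dispatch by four independent strided slices customer_ids[k::4], one per bucket.
import Mathlib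
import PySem

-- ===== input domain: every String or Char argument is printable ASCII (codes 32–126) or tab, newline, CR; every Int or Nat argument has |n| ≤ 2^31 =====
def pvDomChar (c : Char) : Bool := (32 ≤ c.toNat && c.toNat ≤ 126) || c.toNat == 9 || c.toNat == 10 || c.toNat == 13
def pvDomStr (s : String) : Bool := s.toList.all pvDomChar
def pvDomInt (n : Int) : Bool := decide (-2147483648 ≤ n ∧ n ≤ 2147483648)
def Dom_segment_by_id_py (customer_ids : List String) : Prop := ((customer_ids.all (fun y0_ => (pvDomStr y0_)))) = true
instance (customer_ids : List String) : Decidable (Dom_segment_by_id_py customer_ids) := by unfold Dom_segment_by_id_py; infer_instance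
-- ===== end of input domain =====

-- B replaces A's single enumerate loop with mod-4 dispatch by four independent strided slices customer_ids[k::4] (idiomatic; same cost).

-- ===== PORT A =====
-- the loop body: dispatch cust_id into a bucket by i % 4
def segStep (segs : PySem.Dict String (List String)) (p : Int × String) : PySem.Dict String (List String) :=
  if PySem.Int.mod p.1 4 = 0 then PySem.Dict.modify segs "高价值" [] (fun l => l ++ [p.2])
  else if PySem.Int.mod p.1 4 = 1 then PySem.Dict.modify segs "潜力" [] (fun l => l ++ [p.2])
  else if PySem.Int.mod p.1 4 = 2 then PySem.Dict.modify segs "一般" [] (fun l => l ++ [p.2])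
  else PySem.Dict.modify segs "低价值" [] (fun l => l ++ [p.2])

def segment_by_id_py (customer_ids : List String) : List (String × List String) :=
  let segments : PySem.Dict String (List String) :=
    ((((PySem.Dict.empty.insert "高价值" []).insert "潜力" []).insert "一般" []).insert "低价值" [])
  ((PySem.List.enumerate customer_ids 0).foldl segStep segments).items

-- ===== PORT B =====
def segment_by_id_py_alt (customer_ids : List String) : List (String × List String) :=
  ((((PySem.Dict.empty.insert "高价值" ((PySem.List.slice? customer_ids (some 0) none 4).getD [])).insert
      "潜力" ((PySem.List.slice? customer_ids (some 1) none 4).getD [])).insert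
      "一般" ((PySem.List.slice? customer_ids (some 2) none 4).getD [])).insert
      "低价值" ((PySem.List.slice? customer_ids (some 3) none 4).getD [])).items

-- ===== PRECONDITION & SPEC =====
def Spec_segment_by_id_py (customer_ids : List String) (out : List (String × List String)) : Prop := out = segment_by_id_py_alt customer_ids
instance (customer_ids : List String) (out : List (String × List String)) : Decidable (Spec_segment_by_id_py customer_ids out) := by unfold Spec_segment_by_id_py; infer_instance

-- ===== CLAIM (what is proved, stated in full; the proofs are below) =====
def Claim_equal_segment_by_id_py : Prop := ∀ (customer_ids : List String), Dom_segment_by_id_py customer_ids → Spec_segment_by_id_py customer_ids (segment_by_id_py customer_ids)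

-- ===== LEMMAS AND PROOFS =====

-- proof-side helper: every 4th element, starting at the head
def stride4 {α : Type} : List α → List α
  | [] => []
  | x :: rest => x :: stride4 (rest.drop 3)
  termination_by xs => xs.length
  decreasing_by simp

-- abbreviation for B's slice value
def S4 {α : Type} (k : Nat) (xs : List α) : List α :=
  (PySem.List.slice? xs (some (k : Int)) none 4).getD []

theorem S4_shift {α : Type} (k : Nat) (x : α) (xs : List α) :
    S4 (k + 1) (x :: xs) = S4 k xs := by
  have hk1 : ¬(((k:Nat) + 1 : Int) < 0) := by omega
  have hk0 : ¬((k : Int) < 0) := by omega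
  simp only [S4, PySem.List.slice?, PySem.List.sliceIndices, List.length_cons,
    if_neg hk1, if_neg hk0, Option.getD_some, Nat.cast_add, Nat.cast_one,
    show ¬((4:Int) = 0) by norm_num, show ¬((4:Int) < 0) by norm_num, if_false,
    if_pos (show (0:Int) < 4 by norm_num)]
  rw [show min ((k:Int)+1) ((xs.length:Int)+1) = min (k:Int) (xs.length:Int) + 1 by omega]
  by_cases h : min (k:Int) (xs.length:Int) < (xs.length:Int)
  · rw [if_pos (show min (k:Int) (xs.length:Int) + 1 < (xs.length:Int) + 1 by omega), if_pos h,
      show ((xs.length:Int) + 1 - (min (k:Int) (xs.length:Int) + 1) + 4 - 1)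
         = ((xs.length:Int) - min (k:Int) (xs.length:Int) + 4 - 1) by ring]
    congr 1
    funext j
    rw [show (min (k:Int) (xs.length:Int) + 1 + 4 * (j:Int)).toNat
          = (min (k:Int) (xs.length:Int) + 4 * (j:Int)).toNat + 1 by omega,
      List.getElem?_cons_succ]
  · rw [if_neg (show ¬(min (k:Int) (xs.length:Int) + 1 < (xs.length:Int) + 1) by omega), if_neg h]
    simp

theorem S4_zero_cons {α : Type} (x : α) (xs : List α) :
    S4 0 (x :: xs) = x :: S4 0 (xs.drop 3) := by
  simp only [S4, PySem.List.slice?, PySem.List.sliceIndices, List.length_cons,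
    Nat.cast_zero, Nat.cast_add, Nat.cast_one, List.length_drop,
    show ¬((4:Int) = 0) by norm_num, show ¬((4:Int) < 0) by norm_num, if_false,
    show ¬((0:Int) < 0) by norm_num, if_pos (show (0:Int) < 4 by norm_num), Option.getD_some]
  rw [show min (0:Int) ((xs.length:Int)+1) = 0 by omega,
    show min (0:Int) ((xs.length - 3 : Nat):Int) = 0 by omega,
    if_pos (show (0:Int) < (xs.length:Int) + 1 by omega)]
  by_cases hn : 3 < xs.length
  · rw [if_pos (show (0:Int) < ((xs.length - 3 : Nat):Int) by omega),
      show (((xs.length:Int) + 1 - 0 + 4 - 1) / 4).toNat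
         = ((((xs.length - 3 : Nat):Int) - 0 + 4 - 1) / 4).toNat + 1 by omega,
      List.range_succ_eq_map, List.filterMap_cons, List.filterMap_map]
    simp only [Nat.cast_zero]
    show x :: _ = x :: _
    congr 1
    congr 1
    funext j
    simp only [Function.comp_apply]
    rw [show ((0:Int) + 4 * ((Nat.succ j : Nat):Int)).toNat
          = (3 + ((0:Int) + 4 * (j:Int)).toNat) + 1 by omega,
      List.getElem?_cons_succ, List.getElem?_drop]
  · rw [if_neg (show ¬((0:Int) < ((xs.length - 3 : Nat):Int)) by omega),
      show (((xs.length:Int) + 1 - 0 + 4 - 1) / 4).toNat = 1 by omega]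
    simp

theorem S4_nil {α : Type} (k : Nat) : S4 k ([] : List α) = [] := by
  simp [S4, PySem.List.slice?, PySem.List.sliceIndices]

theorem S4_zero {α : Type} (n : Nat) : ∀ (xs : List α), xs.length ≤ n → S4 0 xs = stride4 xs := by
  induction n with
  | zero =>
    intro xs h
    have hx : xs = [] := List.length_eq_zero_iff.mp (by omega)
    subst hx; rw [S4_nil]; simp [stride4]
  | succ n ih =>
    intro xs h
    match xs with
    | [] => rw [S4_nil]; simp [stride4]
    | x :: t =>
      rw [S4_zero_cons, stride4, ih (t.drop 3) (by simp at h ⊢; omega)]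

theorem S4_one {α : Type} (xs : List α) : S4 1 xs = stride4 (xs.drop 1) := by
  match xs with
  | [] => rw [S4_nil]; simp [stride4]
  | x :: t => rw [show (1:Nat) = 0 + 1 from rfl, S4_shift, S4_zero t.length t le_rfl]; rfl

theorem S4_two {α : Type} (xs : List α) : S4 2 xs = stride4 (xs.drop 2) := by
  match xs with
  | [] => rw [S4_nil]; simp [stride4]
  | x :: t => rw [show (2:Nat) = 1 + 1 from rfl, S4_shift, S4_one]; rfl

theorem S4_three {α : Type} (xs : List α) : S4 3 xs = stride4 (xs.drop 3) := by
  match xs with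
  | [] => rw [S4_nil]; simp [stride4]
  | x :: t => rw [show (3:Nat) = 2 + 1 from rfl, S4_shift, S4_two]; rfl

theorem segStep0 (a b c d : List String) (i : Int) (x : String) (h : i % 4 = 0) :
    segStep ⟨[("高价值", a), ("潜力", b), ("一般", c), ("低价值", d)]⟩ (i, x)
      = ⟨[("高价值", a ++ [x]), ("潜力", b), ("一般", c), ("低价值", d)]⟩ := by
  have h0 : PySem.Int.mod i 4 = 0 := by rw [PySem.Int.mod_eq_emod_of_pos (by norm_num)]; omega
  simp only [segStep]
  rw [if_pos h0]
  simp [PySem.Dict.modify, PySem.Dict.insert, PySem.Dict.getD, PySem.Dict.get?, PySem.Dict.contains]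

theorem segStep1 (a b c d : List String) (i : Int) (x : String) (h : i % 4 = 1) :
    segStep ⟨[("高价值", a), ("潜力", b), ("一般", c), ("低价值", d)]⟩ (i, x)
      = ⟨[("高价值", a), ("潜力", b ++ [x]), ("一般", c), ("低价值", d)]⟩ := by
  have h1 : PySem.Int.mod i 4 = 1 := by rw [PySem.Int.mod_eq_emod_of_pos (by norm_num)]; omega
  simp only [segStep]
  rw [if_neg (by rw [h1]; norm_num), if_pos h1]
  simp [PySem.Dict.modify, PySem.Dict.insert, PySem.Dict.getD, PySem.Dict.get?, PySem.Dict.contains]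

theorem segStep2 (a b c d : List String) (i : Int) (x : String) (h : i % 4 = 2) :
    segStep ⟨[("高价值", a), ("潜力", b), ("一般", c), ("低价值", d)]⟩ (i, x)
      = ⟨[("高价值", a), ("潜力", b), ("一般", c ++ [x]), ("低价值", d)]⟩ := by
  have h2 : PySem.Int.mod i 4 = 2 := by rw [PySem.Int.mod_eq_emod_of_pos (by norm_num)]; omega
  simp only [segStep]
  rw [if_neg (by rw [h2]; norm_num), if_neg (by rw [h2]; norm_num), if_pos h2]
  simp [PySem.Dict.modify, PySem.Dict.insert, PySem.Dict.getD, PySem.Dict.get?, PySem.Dict.contains]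

theorem segStep3 (a b c d : List String) (i : Int) (x : String) (h : i % 4 = 3) :
    segStep ⟨[("高价值", a), ("潜力", b), ("一般", c), ("低价值", d)]⟩ (i, x)
      = ⟨[("高价值", a), ("潜力", b), ("一般", c), ("低价值", d ++ [x])]⟩ := by
  have h3 : PySem.Int.mod i 4 = 3 := by rw [PySem.Int.mod_eq_emod_of_pos (by norm_num)]; omega
  simp only [segStep]
  rw [if_neg (by rw [h3]; norm_num), if_neg (by rw [h3]; norm_num),
    if_neg (by rw [h3]; norm_num)]
  simp [PySem.Dict.modify, PySem.Dict.insert, PySem.Dict.getD, PySem.Dict.get?, PySem.Dict.contains]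

theorem foldA (n : Nat) : ∀ (xs : List String), xs.length ≤ n →
    ∀ (i : Int) (a b c d : List String), i % 4 = 0 →
    ((PySem.List.enumerate xs i).foldl segStep
        ⟨[("高价值", a), ("潜力", b), ("一般", c), ("低价值", d)]⟩).items
      = [("高价值", a ++ stride4 xs), ("潜力", b ++ stride4 (xs.drop 1)),
         ("一般", c ++ stride4 (xs.drop 2)), ("低价值", d ++ stride4 (xs.drop 3))] := by
  induction n with
  | zero =>
    intro xs h i a b c d hi
    have hx : xs = [] := List.length_eq_zero_iff.mp (by omega)
    subst hx
    simp [PySem.List.enumerate_nil, stride4]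
  | succ n ih =>
    intro xs h i a b c d hi
    match xs with
    | [] => simp [PySem.List.enumerate_nil, stride4]
    | [x] =>
      simp only [PySem.List.enumerate_cons, PySem.List.enumerate_nil, List.foldl_cons,
        List.foldl_nil]
      rw [segStep0 a b c d i x hi]
      simp [stride4]
    | [x, y] =>
      simp only [PySem.List.enumerate_cons, PySem.List.enumerate_nil, List.foldl_cons,
        List.foldl_nil]
      rw [segStep0 a b c d i x hi, segStep1 _ _ _ _ _ _ (by omega)]
      simp [stride4]
    | [x, y, z] =>
      simp only [PySem.List.enumerate_cons, PySem.List.enumerate_nil, List.foldl_cons,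
        List.foldl_nil]
      rw [segStep0 a b c d i x hi, segStep1 _ _ _ _ _ _ (by omega),
        segStep2 _ _ _ _ _ _ (by omega)]
      simp [stride4]
    | x :: y :: z :: w :: r =>
      have hr : r.length ≤ n := by simp at h; omega
      simp only [PySem.List.enumerate_cons, List.foldl_cons]
      rw [segStep0 a b c d i x hi, segStep1 _ _ _ _ _ _ (by omega),
        segStep2 _ _ _ _ _ _ (by omega), segStep3 _ _ _ _ _ _ (by omega)]
      rw [show List.foldl segStep
            ⟨[("高价值", a ++ [x]), ("潜力", b ++ [y]), ("一般", c ++ [z]), ("低价值", d ++ [w])]⟩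
            (PySem.List.enumerate r (i+1+1+1+1))
          = (PySem.List.enumerate r (i+1+1+1+1)).foldl segStep
            ⟨[("高价值", a ++ [x]), ("潜力", b ++ [y]), ("一般", c ++ [z]), ("低价值", d ++ [w])]⟩ from rfl,
        ih r hr (i+1+1+1+1) _ _ _ _ (by omega)]
      simp [stride4]

-- ===== VERDICT (by name: the statement is the Claim_ definition above) =====
theorem segment_by_id_py_spec : Claim_equal_segment_by_id_py := by
  intro xs _
  show segment_by_id_py xs = segment_by_id_py_alt xs
  unfold segment_by_id_py segment_by_id_py_alt
  rw [show ((((PySem.Dict.empty.insert "高价值" ([]:List String)).insert "潜力" []).insert "一般" []).insert "低价值" [])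
        = (⟨[("高价值", []), ("潜力", []), ("一般", []), ("低价值", [])]⟩ : PySem.Dict String (List String)) by rfl,
    foldA xs.length xs le_rfl 0 [] [] [] [] (by norm_num)]
  have e0 : (PySem.List.slice? xs (some 0) none 4).getD [] = stride4 xs := by
    have := S4_zero xs.length xs le_rfl; simpa [S4] using this
  have e1 : (PySem.List.slice? xs (some 1) none 4).getD [] = stride4 (xs.drop 1) := by
    have := S4_one xs; simpa [S4] using this
  have e2 : (PySem.List.slice? xs (some 2) none 4).getD [] = stride4 (xs.drop 2) := by
    have := S4_two xs; simpa [S4] using this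
  have e3 : (PySem.List.slice? xs (some 3) none 4).getD [] = stride4 (xs.drop 3) := by
    have := S4_three xs; simpa [S4] using this
  simp [PySem.Dict.insert, PySem.Dict.contains, PySem.Dict.empty, e0, e1, e2, e3]
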